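-- pv_equiv track=rewrite | github.com/Bailie-L/Guy | skills/skill_contextual_bandit.py | _streak_info
-- ===== SOURCE A (Python) =====
-- from typing import List, Tuple, Dict, Optional
--
-- def _streak_info(actions: List[str]) -> Tuple[str, int]:
--     if not actions:
--         return ("", 0)
--     last = actions[-1]
--     i = len(actions) - 1
--     c = 0
--     while i >= 0 and actions[i] == last:
--         c += 1
--         i -= 1
--     return (last, c)
-- ===== SOURCE B (Python) =====
-- from itertools import groupby
-- from typing import List, Tuple
--
-- def _streak_info(actions: List[str]) -> Tuple[str, int]:
--     if not actions:
--         return ("", 0)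
--     groups = [(key, sum(1 for _ in g)) for key, g in groupby(actions)]
--     return groups[-1]
-- ===== Notes on version B (the rewrite author's own statement) =====
-- stated objective: idiomatic
-- what changed: Replaced the index-based backward while-loop over the trailing run with a single forward itertools.groupby pass that materializes every consecutive run as (key, count) and returns the last one.
import Mathlib
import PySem

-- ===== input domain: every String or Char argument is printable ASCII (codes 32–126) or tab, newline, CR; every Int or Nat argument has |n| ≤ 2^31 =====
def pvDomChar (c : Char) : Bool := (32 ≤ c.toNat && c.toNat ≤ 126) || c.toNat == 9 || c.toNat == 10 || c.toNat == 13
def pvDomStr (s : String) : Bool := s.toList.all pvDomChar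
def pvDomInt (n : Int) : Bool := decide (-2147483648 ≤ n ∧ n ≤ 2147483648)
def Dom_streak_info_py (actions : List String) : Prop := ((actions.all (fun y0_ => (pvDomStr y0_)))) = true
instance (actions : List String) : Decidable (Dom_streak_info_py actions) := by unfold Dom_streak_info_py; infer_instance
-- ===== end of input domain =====

-- B replaces A's backward trailing-run scan with a forward groupby pass that builds every
-- consecutive run and returns the last one (objective: idiomatic; return value only).

-- ===== PORT A =====
-- the while loop 'while i >= 0 and actions[i] == last: c += 1; i -= 1', fuel k = i + 1
def streakLoopA (actions : List String) (last : String) : Nat → Int → Int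
  | 0, c => c
  | k + 1, c =>
    if PySem.List.pyGet? actions (k : Int) = some last then
      streakLoopA actions last k (c + 1)
    else c

def streak_info_py (actions : List String) : String × Int :=
  if actions = [] then ("", 0)
  else
    let last := (PySem.List.pyGet? actions (-1)).getD ""
    (last, streakLoopA actions last actions.length 0)

-- ===== PORT B =====
-- itertools.groupby: each consecutive run materialized as (key, count)
def runsB : List String → List (String × Int)
  | [] => []
  | x :: xs =>
    (x, 1 + ((xs.takeWhile (· == x)).length : Int)) :: runsB (xs.dropWhile (· == x))
  termination_by l => l.length
  decreasing_by
    have := List.length_dropWhile_le (· == x) xs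
    simp; omega

def streak_info_py_alt (actions : List String) : String × Int :=
  if actions = [] then ("", 0)
  else (runsB actions).getLastD ("", 0)

-- ===== PRECONDITION & SPEC =====
def Spec_streak_info_py (actions : List String) (out : String × Int) : Prop := out = streak_info_py_alt actions
instance (actions : List String) (out : String × Int) : Decidable (Spec_streak_info_py actions out) := by unfold Spec_streak_info_py; infer_instance

-- ===== CLAIM (what is proved, stated in full; the proofs are below) =====
def Claim_equal_streak_info_py : Prop := ∀ (actions : List String), Dom_streak_info_py actions → Spec_streak_info_py actions (streak_info_py actions)

-- ===== LEMMAS AND PROOFS =====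

-- reference: last element with the length of its trailing run (as a takeWhile on the reverse)
def refStreak (l : List String) : String × Int :=
  match l.getLast? with
  | none => ("", 0)
  | some x0 => (x0, ((l.reverse.takeWhile (· == x0)).length : Int))

theorem streakLoopA_inv (actions : List String) (last : String) :
    ∀ (k : Nat) (c : Int), k ≤ actions.length →
      streakLoopA actions last k c
        = c + (((actions.take k).reverse.takeWhile (· == last)).length : Int) := by
  intro k
  induction k with
  | zero => intro c _; simp [streakLoopA]
  | succ k ih =>
    intro c hk
    have hklt : k < actions.length := by omega
    have hget : PySem.List.pyGet? actions (k : Int) = some actions[k] :=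
      PySem.List.pyGet?_ofNat actions k hklt
    have htake : (actions.take (k + 1)).reverse
        = actions[k] :: (actions.take k).reverse := by
      rw [List.take_add_one]
      simp [List.getElem?_eq_getElem hklt]
    rw [streakLoopA, hget, htake]
    by_cases h : actions[k] = last
    · simp only [h]
      rw [ih (c + 1) (by omega)]
      simp
      ring
    · have : ¬ (some actions[k] = some last) := by simp [h]
      rw [if_neg this]
      simp [h]

theorem portA_eq_ref (actions : List String) :
    streak_info_py actions = refStreak actions := by
  by_cases hnil : actions = []
  · subst hnil; simp [streak_info_py, refStreak]
  · have hlast : actions.getLast? = some (actions.getLast hnil) :=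
      List.getLast?_eq_some_getLast hnil
    simp only [streak_info_py, if_neg hnil, PySem.List.pyGet?_neg_one, hlast,
      Option.getD_some, refStreak]
    rw [streakLoopA_inv actions _ actions.length 0 (le_refl _)]
    simp

-- constant runs: a nonempty list all of whose elements equal x has trailing run the whole list
theorem ref_const (x : String) (l : List String) (hnil : l ≠ [])
    (hall : ∀ a ∈ l, a = x) : refStreak l = (x, (l.length : Int)) := by
  have hlast : l.getLast? = some (l.getLast hnil) := List.getLast?_eq_some_getLast hnil
  have hx0 : l.getLast hnil = x := hall _ (List.getLast_mem hnil)
  have htw : l.reverse.takeWhile (· == x) = l.reverse := by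
    apply List.takeWhile_eq_self_iff.mpr
    intro a ha
    have := hall a (by simpa using ha)
    simp [this]
  simp [refStreak, hlast, hx0, htw]

-- appending after the run head: the trailing run of (x :: grp ++ rest) is that of rest,
-- when rest is nonempty and starts with an element ≠ x while grp is all x
theorem ref_skip (x : String) (grp rest : List String) (hrest : rest ≠ [])
    (hgrp : ∀ a ∈ grp, a = x) (hhead : ∀ r, rest.head? = some r → r ≠ x) :
    refStreak (x :: (grp ++ rest)) = refStreak rest := by
  have hlast : (x :: (grp ++ rest)).getLast? = rest.getLast? := by
    rw [show x :: (grp ++ rest) = (x :: grp) ++ rest by simp]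
    exact List.getLast?_append_of_ne_nil (x :: grp) hrest
  have hlast2 : rest.getLast? = some (rest.getLast hrest) := List.getLast?_eq_some_getLast hrest
  set x0 := rest.getLast hrest with hx0
  have hrev : (x :: (grp ++ rest)).reverse = rest.reverse ++ (grp.reverse ++ [x]) := by
    simp
  have htw : (rest.reverse ++ (grp.reverse ++ [x])).takeWhile (· == x0)
      = rest.reverse.takeWhile (· == x0) := by
    rw [List.takeWhile_append]
    split_ifs with hfull
    · -- takeWhile consumed all of rest.reverse: every element of rest equals x0, so x0 ≠ x
      have heq : rest.reverse.takeWhile (· == x0) = rest.reverse :=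
        (List.takeWhile_prefix _).eq_of_length hfull
      have hall : ∀ a ∈ rest, a = x0 := by
        intro a ha
        have : a ∈ rest.reverse.takeWhile (· == x0) := by rw [heq]; simpa using ha
        simpa using List.mem_takeWhile_imp this
      obtain ⟨r, rs, hr⟩ := List.exists_cons_of_ne_nil hrest
      have hx0x : x0 ≠ x := by
        have h1 : r = x0 := hall r (by simp [hr])
        have h2 : r ≠ x := hhead r (by simp [hr])
        exact h1 ▸ h2
      have hnil2 : grp.reverse ++ [x] ≠ [] := by simp
      obtain ⟨h0, t0, ht0⟩ := List.exists_cons_of_ne_nil hnil2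
      have hh0 : h0 = x := by
        have : h0 ∈ grp.reverse ++ [x] := ht0 ▸ List.mem_cons_self
        rcases List.mem_append.mp this with h | h
        · exact hgrp _ (by simpa using h)
        · simpa using h
      have : (grp.reverse ++ [x]).takeWhile (· == x0) = [] := by
        rw [ht0, List.takeWhile_cons]
        have : (h0 == x0) = false := by
          subst hh0
          exact beq_eq_false_iff_ne.mpr (fun h => hx0x h.symm)
        simp [this]
      rw [this, List.append_nil, heq]
    · rfl
  have hred : ∀ (l : List String),
      refStreak l = match l.getLast? with
        | none => ("", 0)
        | some y => (y, ((l.reverse.takeWhile (· == y)).length : Int)) := fun _ => rfl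
  rw [hred, hred, hlast, hlast2, hrev]
  simp only [htw]

-- runsB never returns [] on a nonempty list
theorem runsB_ne_nil (x : String) (xs : List String) : runsB (x :: xs) ≠ [] := by
  rw [runsB]; simp

theorem portB_eq_ref (actions : List String) :
    streak_info_py_alt actions = refStreak actions := by
  suffices h : ∀ (n : Nat) (l : List String), l.length ≤ n → l ≠ [] →
      (runsB l).getLastD ("", 0) = refStreak l by
    by_cases hnil : actions = []
    · subst hnil; simp [streak_info_py_alt, refStreak]
    · simp only [streak_info_py_alt, if_neg hnil]
      exact h actions.length actions (le_refl _) hnil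
  intro n
  induction n with
  | zero => intro l hl hnil; cases l with
    | nil => exact absurd rfl hnil
    | cons x xs => simp at hl
  | succ n ih =>
    intro l hl hnil
    cases l with
    | nil => exact absurd rfl hnil
    | cons x xs =>
      rw [runsB]
      set grp := xs.takeWhile (· == x) with hgrpdef
      set rest := xs.dropWhile (· == x) with hrestdef
      have hsplit : xs = grp ++ rest := (List.takeWhile_append_dropWhile).symm
      have hgrp : ∀ a ∈ grp, a = x := by
        intro a ha
        exact eq_of_beq (@List.mem_takeWhile_imp _ (· == x) xs a ha)
      by_cases hr : rest = []
      · -- whole list is one constant run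
        have hxs : ∀ a ∈ x :: xs, a = x := by
          intro a ha
          rcases List.mem_cons.mp ha with h | h
          · exact h
          · exact hgrp a (by rw [hsplit, hr, List.append_nil] at h; exact h)
        rw [hr]
        simp only [show runsB [] = [] by simp [runsB]]
        rw [ref_const x (x :: xs) (by simp) hxs]
        have hlen : xs.length = grp.length := by
          rw [hsplit, hr]; simp
        simp [hlen]
        ring
      · -- the trailing run lies inside rest
        have hhead : ∀ r, rest.head? = some r → r ≠ x := by
          intro r hrh
          have := List.head?_dropWhile_not (· == x) xs
          rw [← hrestdef, hrh] at this
          simpa using this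
        have hrlen : rest.length ≤ n := by
          have h1 : rest.length ≤ xs.length := hrestdef ▸ List.length_dropWhile_le _ _
          simp at hl
          omega
        rw [List.getLastD_cons]
        have hrne : runsB rest ≠ [] := by
          cases hrw : rest with
          | nil => exact absurd hrw hr
          | cons a as => exact hrw ▸ runsB_ne_nil a as
        obtain ⟨y, ys, hy⟩ := List.exists_cons_of_ne_nil hrne
        rw [hy]
        have : (y :: ys).getLastD (x, 1 + (grp.length : Int)) = (y :: ys).getLastD ("", 0) := by
          rw [List.getLastD_eq_getLast?, List.getLastD_eq_getLast?,
            List.getLast?_eq_some_getLast (by simp : y :: ys ≠ [])]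
          simp
        rw [this, ← hy, ih rest hrlen hr]
        have hxx : x :: xs = x :: (grp ++ rest) := by rw [← hsplit]
        rw [hxx, ref_skip x grp rest hr hgrp hhead]

-- ===== VERDICT (by name: the statement is the Claim_ definition above) =====
theorem streak_info_py_spec : Claim_equal_streak_info_py := by
  intro actions _
  unfold Spec_streak_info_py
  rw [portA_eq_ref, portB_eq_ref]
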